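-- pv_equiv track=rewrite | github.com/chaswin/RoEMfMSAA_auto | 2.2FTO_MSA/Graph.py | array_to_block
-- ===== SOURCE A (Python) =====
-- def array_to_block(arr):
--     result = []
--     differences = []
--     n = len(arr)
--     i = 0
--
--     while i < n:
--         if arr[i] != -1:
--             start = arr[i]
--             start_index = i
--             while i + 1 < n and arr[i + 1] != -1 and arr[i]+1==arr[i+1]:
--                 i += 1
--             end = arr[i]
--             end_index = i
--             result.append([[start, start_index], [end, end_index]])
--             differences.append(start - start_index)
--         i += 1
--
--     return result, differences
-- ===== SOURCE B (Python) =====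
-- def _close(run, result, differences):
--     k, a, b = run
--     result.append([[k + a, a], [k + b, b]])
--     differences.append(k)
--
-- def array_to_block(arr):
--     result = []
--     differences = []
--     run = None  # (key, first_index, last_index) of the open block, key = value - index
--     for i, v in enumerate(arr):
--         if v == -1:
--             if run is not None:
--                 _close(run, result, differences)
--             run = None
--         else:
--             k = v - i
--             if run is not None and run[0] == k:
--                 run = (k, run[1], i)
--             else:
--                 if run is not None:
--                     _close(run, result, differences)
--                 run = (k, i, i)
--     if run is not None:
--         _close(run, result, differences)
--     return result, differences
-- ===== Notes on version B (the rewrite author's own statement) =====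
-- stated objective: alternative
-- what changed: Replaces A's nested while-loops (index-jumping inner run-extension) by a single state-machine fold over enumerate(arr) that groups maximal consecutive blocks of constant key v - i among non -1 entries, closing a block when the key changes.
import Mathlib
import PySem

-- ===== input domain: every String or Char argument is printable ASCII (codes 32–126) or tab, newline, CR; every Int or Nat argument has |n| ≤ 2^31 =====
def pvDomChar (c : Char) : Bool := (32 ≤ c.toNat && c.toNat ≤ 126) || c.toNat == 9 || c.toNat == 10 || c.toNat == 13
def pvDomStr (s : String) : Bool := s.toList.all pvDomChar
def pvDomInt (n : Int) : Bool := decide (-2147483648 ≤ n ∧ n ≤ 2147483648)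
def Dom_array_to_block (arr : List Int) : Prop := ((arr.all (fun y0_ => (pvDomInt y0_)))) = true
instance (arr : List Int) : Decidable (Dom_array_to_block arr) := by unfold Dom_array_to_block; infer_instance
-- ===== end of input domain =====

-- B replaces A's nested while-loop run extension by a single fold over enumerate(arr)
-- keyed on the run invariant v - i (objective: alternative decomposition, same cost).


-- ===== PORT A =====
-- inner while loop: extends i while i+1 < n and arr[i+1] != -1 and arr[i]+1 == arr[i+1].
-- arr[i] is always accessed with 0 ≤ i < len arr, so List.getD is exact here.
def aInner (arr : List Int) (i : Nat) : Nat :=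
  if h : i + 1 < arr.length ∧ arr.getD (i+1) 0 ≠ -1 ∧ arr.getD i 0 + 1 = arr.getD (i+1) 0
  then aInner arr (i+1) else i
termination_by arr.length - i
decreasing_by omega

-- the port of A's outer while cites this for termination (the inner loop never moves i backwards)
theorem aInner_ge (arr : List Int) (i : Nat) : i ≤ aInner arr i := by
  unfold aInner
  split
  · have := aInner_ge arr (i+1); omega
  · exact le_refl i
termination_by arr.length - i
decreasing_by omega

-- outer while loop of A, with the two accumulators result / differences
def aOuter (arr : List Int) (i : Nat) (result : List (List (List Int))) (diffs : List Int) :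
    List (List (List Int)) × List Int :=
  if h : i < arr.length then
    if arr.getD i 0 ≠ -1 then
      let j := aInner arr i
      aOuter arr (j+1) (result ++ [[[arr.getD i 0, (i:Int)], [arr.getD j 0, (j:Int)]]])
        (diffs ++ [arr.getD i 0 - (i:Int)])
    else aOuter arr (i+1) result diffs
  else (result, diffs)
termination_by arr.length - i
decreasing_by
  · have := aInner_ge arr i; omega
  · omega

def array_to_block (arr : List Int) : List (List (List Int)) × List Int :=
  aOuter arr 0 [] []

-- ===== PORT B =====
-- helper _close: emit the block and its difference for a finished run (key, first, last)
def bClose (r : Int × Int × Int) (res : List (List (List Int))) (dif : List Int) :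
    List (List (List Int)) × List Int :=
  (res ++ [[[r.1 + r.2.1, r.2.1], [r.1 + r.2.2, r.2.2]]], dif ++ [r.1])

-- loop body of B's 'for i, v in enumerate(arr)'
def bStep (st : List (List (List Int)) × List Int × Option (Int × Int × Int)) (iv : Int × Int) :
    List (List (List Int)) × List Int × Option (Int × Int × Int) :=
  let (i, v) := iv
  let (res, dif, run) := st
  if v = -1 then
    match run with
    | none => (res, dif, none)
    | some r => let (res', dif') := bClose r res dif; (res', dif', none)
  else
    let k := v - i
    match run with
    | some r =>
        if r.1 = k then (res, dif, some (k, r.2.1, i))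
        else let (res', dif') := bClose r res dif; (res', dif', some (k, i, i))
    | none => (res, dif, some (k, i, i))

-- B's trailing 'if run is not None: _close(...)' then return
def bFinish (st : List (List (List Int)) × List Int × Option (Int × Int × Int)) :
    List (List (List Int)) × List Int :=
  match st.2.2 with
  | none => (st.1, st.2.1)
  | some r => bClose r st.1 st.2.1

def array_to_block_alt (arr : List Int) : List (List (List Int)) × List Int :=
  bFinish ((PySem.List.enumerate arr 0).foldl bStep ([], [], none))

-- ===== PRECONDITION & SPEC =====
def Spec_array_to_block (arr : List Int) (out : List (List (List Int)) × List Int) : Prop := out = array_to_block_alt arr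
instance (arr : List Int) (out : List (List (List Int)) × List Int) : Decidable (Spec_array_to_block arr out) := by unfold Spec_array_to_block; infer_instance

-- ===== CLAIM (what is proved, stated in full; the proofs are below) =====
def Claim_equal_array_to_block : Prop := ∀ (arr : List Int), Dom_array_to_block arr → Spec_array_to_block arr (array_to_block arr)

-- ===== LEMMAS AND PROOFS =====

-- B's fold over enumerate, rewritten as structural recursion with an explicit index counter
def bRun (l : List Int) (s : Int) (st : List (List (List Int)) × List Int × Option (Int × Int × Int)) :
    List (List (List Int)) × List Int × Option (Int × Int × Int) :=
  match l with
  | [] => st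
  | v :: t => bRun t (s+1) (bStep st (s, v))

theorem foldl_enum (l : List Int) (s : Int) (st : List (List (List Int)) × List Int × Option (Int × Int × Int)) :
    (PySem.List.enumerate l s).foldl bStep st = bRun l s st := by
  induction l generalizing s st with
  | nil => simp [PySem.List.enumerate_nil, bRun]
  | cons v t ih => simp [PySem.List.enumerate_cons, bRun, List.foldl_cons, ih]

theorem aInner_lt (arr : List Int) (i : Nat) (h : i < arr.length) : aInner arr i < arr.length := by
  unfold aInner
  split
  · next hc => exact aInner_lt arr (i+1) hc.1
  · exact h
termination_by arr.length - i
decreasing_by omega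

-- the run invariant: the inner loop preserves value - index
theorem aInner_key (arr : List Int) (i : Nat) :
    (arr.getD (aInner arr i) 0 : Int) - (aInner arr i : Int) = arr.getD i 0 - (i : Int) := by
  unfold aInner
  split
  · next hc =>
      have := aInner_key arr (i+1)
      rw [this]
      have h2 := hc.2.2
      push_cast
      omega
  · rfl
termination_by arr.length - i
decreasing_by omega

theorem aInner_stop (arr : List Int) (i : Nat)
    (h : ¬ (i + 1 < arr.length ∧ arr.getD (i+1) 0 ≠ -1 ∧ arr.getD i 0 + 1 = arr.getD (i+1) 0)) :
    aInner arr i = i := by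
  rw [aInner, dif_neg h]

theorem aInner_step (arr : List Int) (i : Nat)
    (h : i + 1 < arr.length ∧ arr.getD (i+1) 0 ≠ -1 ∧ arr.getD i 0 + 1 = arr.getD (i+1) 0) :
    aInner arr i = aInner arr (i+1) := by
  rw [aInner, dif_pos h]

theorem aOuter_stop (arr : List Int) (i : Nat) (res : List (List (List Int))) (dif : List Int)
    (h : ¬ i < arr.length) : aOuter arr i res dif = (res, dif) := by
  rw [aOuter, dif_neg h]

theorem aOuter_skip (arr : List Int) (i : Nat) (res : List (List (List Int))) (dif : List Int)
    (h : i < arr.length) (h2 : arr.getD i 0 = -1) :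
    aOuter arr i res dif = aOuter arr (i+1) res dif := by
  rw [aOuter, dif_pos h, if_neg (by simp only [ne_eq, not_not]; exact h2)]

theorem aOuter_take (arr : List Int) (i : Nat) (res : List (List (List Int))) (dif : List Int)
    (h : i < arr.length) (h2 : arr.getD i 0 ≠ -1) :
    aOuter arr i res dif =
      aOuter arr (aInner arr i + 1)
        (res ++ [[[arr.getD i 0, (i:Int)], [arr.getD (aInner arr i) 0, (aInner arr i : Int)]]])
        (dif ++ [arr.getD i 0 - (i:Int)]) := by
  rw [aOuter, dif_pos h, if_pos h2]

-- main correspondence, both loop shapes at once, by strong induction on the remaining length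
theorem main_corr (arr : List Int) (d : Nat) : ∀ (i : Nat), arr.length - i = d →
    (∀ (res : List (List (List Int))) (dif : List Int) (k s : Int),
       i < arr.length → k = arr.getD i 0 - (i : Int) →
       bFinish (bRun (arr.drop (i+1)) ((i:Int)+1) (res, dif, some (k, s, (i:Int)))) =
       aOuter arr (aInner arr i + 1)
         (res ++ [[[k + s, s], [k + (aInner arr i : Int), (aInner arr i : Int)]]]) (dif ++ [k]))
    ∧ (∀ (res : List (List (List Int))) (dif : List Int),
       bFinish (bRun (arr.drop i) (i:Int) (res, dif, none)) = aOuter arr i res dif) := by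
  induction d using Nat.strong_induction_on with
  | _ d ih =>
    intro i hd
    have haux : ∀ (res : List (List (List Int))) (dif : List Int) (k s : Int),
       i < arr.length → k = arr.getD i 0 - (i : Int) →
       bFinish (bRun (arr.drop (i+1)) ((i:Int)+1) (res, dif, some (k, s, (i:Int)))) =
       aOuter arr (aInner arr i + 1)
         (res ++ [[[k + s, s], [k + (aInner arr i : Int), (aInner arr i : Int)]]]) (dif ++ [k]) := by
      intro res dif k s hi hk
      by_cases hn : i + 1 < arr.length
      · have hdrop : arr.drop (i+1) = arr.getD (i+1) 0 :: arr.drop (i+2) := by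
          rw [List.getD_eq_getElem _ _ hn, List.drop_eq_getElem_cons hn]
        set v := arr.getD (i+1) 0 with hv
        by_cases hcont : v ≠ -1 ∧ arr.getD i 0 + 1 = v
        · -- extension step of both loops
          have hstep := aInner_step arr i ⟨hn, hcont.1, hcont.2⟩
          have hkv : k = v - ((i:Int)+1) := by omega
          have hIH := (ih (arr.length - (i+1)) (by omega) (i+1) rfl).1 res dif k s hn (by omega)
          rw [hdrop, bRun]
          have hbs : bStep (res, dif, some (k, s, (i:Int))) ((i:Int)+1, v) =
              (res, dif, some (k, s, (i:Int)+1)) := by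
            simp [bStep, hcont.1, ← hkv]
          rw [hbs, hstep]
          push_cast at hIH ⊢
          exact hIH
        · -- the run closes here
          have hstop := aInner_stop arr i (by
            intro hcc; exact hcont ⟨hcc.2.1, hcc.2.2⟩)
          rw [hstop, hdrop, bRun]
          by_cases hv1 : v = -1
          · -- next element invalid: close, no new run opens
            have hbs : bStep (res, dif, some (k, s, (i:Int))) ((i:Int)+1, v) =
                (res ++ [[[k + s, s], [k + (i:Int), (i:Int)]]], dif ++ [k], none) := by
              simp [bStep, hv1, bClose]
            rw [hbs]
            have hM := (ih (arr.length - (i+1)) (by omega) (i+1) rfl).2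
              (res ++ [[[k + s, s], [k + (i:Int), (i:Int)]]]) (dif ++ [k])
            rw [show arr.drop (i+1) = arr.getD (i+1) 0 :: arr.drop (i+2) from hdrop, bRun] at hM
            have hbs2 : bStep (res ++ [[[k + s, s], [k + (i:Int), (i:Int)]]], dif ++ [k], none)
                ((i:Int)+1, v) = (res ++ [[[k + s, s], [k + (i:Int), (i:Int)]]], dif ++ [k], none) := by
              simp [bStep, hv1]
            rw [← hv] at hM
            push_cast at hM
            rw [hbs2] at hM
            exact hM
          · -- next element valid but with a different key: close, open a new run
            have hne : ¬ (arr.getD i 0 + 1 = v) := by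
              intro hcc; exact hcont ⟨hv1, hcc⟩
            set k' := v - ((i:Int)+1) with hk'
            have hbs : bStep (res, dif, some (k, s, (i:Int))) ((i:Int)+1, v) =
                (res ++ [[[k + s, s], [k + (i:Int), (i:Int)]]], dif ++ [k], some (k', (i:Int)+1, (i:Int)+1)) := by
              have hkk : ¬ (k = v - ((i:Int)+1)) := by omega
              simp [bStep, hv1, bClose, hk', hkk]
            rw [hbs]
            have hIH := (ih (arr.length - (i+1)) (by omega) (i+1) rfl).1
              (res ++ [[[k + s, s], [k + (i:Int), (i:Int)]]]) (dif ++ [k]) k' ((i:Int)+1) hn (by push_cast; omega)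
            set j := aInner arr (i+1) with hj
            have hjkey := aInner_key arr (i+1)
            rw [← hj] at hjkey
            have hvne : arr.getD (i+1) 0 ≠ -1 := by rw [← hv]; exact hv1
            have haO := aOuter_take arr (i+1) (res ++ [[[k + s, s], [k + (i:Int), (i:Int)]]]) (dif ++ [k]) hn hvne
            rw [← hj, ← hv] at haO
            rw [haO]
            have hvj : (arr.getD j 0 : Int) = k' + (j:Int) := by
              push_cast at hjkey ⊢; omega
            have hvv : (v : Int) = k' + ((i:Int)+1) := by omega
            rw [hvj, hvv]
            push_cast at hIH ⊢
            rw [hIH]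
            ring_nf
      · -- i+1 is past the end: both loops stop, B flushes the open run
        have hstop := aInner_stop arr i (by intro hcc; omega)
        have hdrop : arr.drop (i+1) = ([] : List Int) := List.drop_eq_nil_of_le (by omega)
        rw [hdrop, bRun, hstop]
        rw [aOuter_stop arr (i+1) _ _ (by omega)]
        simp [bFinish, bClose]
    refine ⟨haux, ?_⟩
    intro res dif
    by_cases hi : i < arr.length
    · have hdrop : arr.drop i = arr.getD i 0 :: arr.drop (i+1) := by
        rw [List.getD_eq_getElem _ _ hi, List.drop_eq_getElem_cons hi]
      rw [hdrop, bRun]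
      set v := arr.getD i 0 with hv
      by_cases hv1 : v = -1
      · have hbs : bStep (res, dif, none) ((i:Int), v) = (res, dif, none) := by
          simp [bStep, hv1]
        rw [hbs]
        have hM := (ih (arr.length - (i+1)) (by omega) (i+1) rfl).2 res dif
        rw [aOuter_skip arr i res dif hi (by rw [← hv]; exact hv1)]
        push_cast at hM ⊢
        exact hM
      · set k := v - (i:Int) with hk
        have hbs : bStep (res, dif, none) ((i:Int), v) = (res, dif, some (k, (i:Int), (i:Int))) := by
          simp [bStep, hv1, hk]
        rw [hbs]
        have hIH := haux res dif k (i:Int) hi (by rw [hk, hv])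
        set j := aInner arr i with hj
        have hjkey := aInner_key arr i
        rw [← hj] at hjkey
        have hvj : (arr.getD j 0 : Int) = k + (j:Int) := by
          rw [hk, hv]; omega
        have haO := aOuter_take arr i res dif hi (by rw [← hv]; exact hv1)
        rw [← hj, ← hv] at haO
        rw [haO, hvj]
        have hvv : (v : Int) = k + (i:Int) := by omega
        rw [hvv, add_sub_cancel_right]
        exact hIH
    · have hdrop : arr.drop i = ([] : List Int) := List.drop_eq_nil_of_le (by omega)
      rw [hdrop, bRun, aOuter_stop arr i res dif hi]
      simp [bFinish]

-- ===== VERDICT (by name: the statement is the Claim_ definition above) =====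
theorem array_to_block_spec : Claim_equal_array_to_block := by
  intro arr _
  unfold Spec_array_to_block array_to_block array_to_block_alt
  rw [foldl_enum]
  have hM := (main_corr arr arr.length 0 (by omega)).2 [] []
  simpa using hM.symm
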